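-- pv_equiv track=rewrite | github.com/abarhub/pynumber | test1.py | listValue
-- ===== SOURCE A (Python) =====
-- from builtins import list
--
-- def incr(tab: list[int]) -> list[int]:
--     len2 = len(tab)
--     tab2: list[int] = tab.copy()
--     pos = len2 - 1
--     while pos >= 0:
--         v = tab2[pos]
--         if v < 9:
--             v = v + 1
--             tab2[pos] = v
--             break
--         else:
--             tab2[pos] = 0
--             pos = pos - 1
--     if pos < 0:
--         return []
--     else:
--         return tab2
--
-- def listValue(n: int) -> list[list[int]]:
--     res: list[list[int]] = []
--     res2: list[int] = [0 for _ in range(0, n)]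
--     res.append(res2)
--
--     res3: list[int] = res2.copy()
--     while True:
--         res3 = incr(res3)
--         if len(res3) == 0:
--             break
--         else:
--             res.append(res3)
--     return res
-- ===== SOURCE B (Python) =====
-- def listValue(n: int) -> list[list[int]]:
--     if n <= 0:
--         return [[]]
--     rest = listValue(n - 1)
--     return [[d] + r for d in range(10) for r in rest]
-- ===== Notes on version B (the rewrite author's own statement) =====
-- stated objective: simpler
-- what changed: Replaces the mutable base-10 counter (incr stepped from the all-zero list until overflow) by a direct recursive Cartesian product: prepend each digit 0..9 to every (n-1)-digit combination, with the base case n<=0 yielding the single empty combination.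
import Mathlib
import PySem

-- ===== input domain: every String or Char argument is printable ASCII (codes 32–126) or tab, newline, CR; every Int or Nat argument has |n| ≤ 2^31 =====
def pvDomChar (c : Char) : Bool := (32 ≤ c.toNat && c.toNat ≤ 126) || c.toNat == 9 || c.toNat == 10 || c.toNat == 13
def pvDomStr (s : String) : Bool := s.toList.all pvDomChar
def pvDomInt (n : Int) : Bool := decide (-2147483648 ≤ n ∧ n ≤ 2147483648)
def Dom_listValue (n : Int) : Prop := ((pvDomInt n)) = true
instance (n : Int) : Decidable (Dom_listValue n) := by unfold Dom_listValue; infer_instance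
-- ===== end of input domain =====

-- B replaces A's mutable base-10 counter loop by a recursive Cartesian product (simpler); same return value for every n.

-- ===== PORT A =====
-- the 'while pos >= 0' loop of incr, recursing on pos; tab2[pos] is always in range
-- when called from incr (pos starts at len-1 and only decreases), so getD is exact there.
-- In the v = 9, pos = 0 case Python sets tab2[0] = 0, leaves the loop with pos = -1 and
-- returns []; the discarded write is omitted.
def incrFrom (tab2 : List Int) (pos : Nat) : List Int :=
  let v := tab2.getD pos 0
  if v < 9 then tab2.set pos (v + 1)
  else if pos = 0 then []
  else incrFrom (tab2.set pos 0) (pos - 1)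
termination_by pos

def incr (tab : List Int) : List Int :=
  if tab.length = 0 then [] else incrFrom tab (tab.length - 1)

-- the 'while True' loop of listValue; fuel 10^len+1 is enough (proved below), so this
-- computes exactly what the Python loop computes.
def listValueLoop (fuel : Nat) (res3 : List Int) (res : List (List Int)) : List (List Int) :=
  match fuel with
  | 0 => res
  | fuel + 1 =>
    let r := incr res3
    if r.length = 0 then res
    else listValueLoop fuel r (res ++ [r])

def listValue (n : Int) : List (List Int) :=
  let res2 : List Int := (PySem.List.pyRange 0 n 1).map (fun _ => (0 : Int))
  listValueLoop (10 ^ res2.length + 1) res2 [res2]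

-- ===== PORT B =====
def listValue_alt (n : Int) : List (List Int) :=
  if n ≤ 0 then [[]]
  else (PySem.List.pyRange 0 10).flatMap (fun d => (listValue_alt (n - 1)).map (fun r => d :: r))
termination_by n.toNat
decreasing_by omega

-- ===== PRECONDITION & SPEC =====
def Spec_listValue (n : Int) (out : List (List Int)) : Prop := out = listValue_alt n
instance (n : Int) (out : List (List Int)) : Decidable (Spec_listValue n out) := by unfold Spec_listValue; infer_instance

-- ===== CLAIM (what is proved, stated in full; the proofs are below) =====
def Claim_equal_listValue : Prop := ∀ (n : Int), Dom_listValue n → Spec_listValue n (listValue n)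

-- ===== LEMMAS AND PROOFS =====

-- k-digit base-10 encoding of m, most significant digit first
def enc (k m : Nat) : List Int :=
  match k with
  | 0 => []
  | k + 1 => enc k (m / 10) ++ [((m % 10 : Nat) : Int)]

theorem enc_length (k m : Nat) : (enc k m).length = k := by
  induction k generalizing m with
  | zero => rfl
  | succ k ih => simp [enc, ih]

theorem enc_zero (k : Nat) : enc k 0 = List.replicate k 0 := by
  induction k with
  | zero => rfl
  | succ k ih => simp [enc, ih, List.replicate_succ']

theorem incrFrom_append (xs ys : List Int) (pos : Nat) (h : pos < xs.length) :
    incrFrom (xs ++ ys) pos =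
      (if incrFrom xs pos = [] then [] else incrFrom xs pos ++ ys) := by
  induction pos generalizing xs with
  | zero =>
    rw [incrFrom]
    conv_rhs => rw [incrFrom]
    rw [List.getD_append _ _ _ _ h]
    by_cases h1 : xs.getD 0 0 < 9
    · rw [if_pos h1, if_pos h1, List.set_append_left 0 _ h]
      have hne : xs.set 0 (xs.getD 0 0 + 1) ≠ [] := by
        intro hc
        have h0 := congrArg List.length hc
        rw [List.length_set] at h0
        simp only [List.length_nil] at h0
        omega
      rw [if_neg hne]
    · rw [if_neg h1, if_neg h1]
      simp
  | succ p ih =>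
    rw [incrFrom]
    conv_rhs => rw [incrFrom]
    rw [List.getD_append _ _ _ _ h]
    by_cases h1 : xs.getD (p + 1) 0 < 9
    · rw [if_pos h1, if_pos h1, List.set_append_left (p + 1) _ h]
      have hne : xs.set (p + 1) (xs.getD (p + 1) 0 + 1) ≠ [] := by
        intro hc
        have h0 := congrArg List.length hc
        rw [List.length_set] at h0
        simp only [List.length_nil] at h0
        omega
      rw [if_neg hne]
    · rw [if_neg h1, if_neg h1, if_neg (Nat.succ_ne_zero p), if_neg (Nat.succ_ne_zero p)]
      rw [List.set_append_left (p + 1) _ h]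
      simp only [Nat.add_sub_cancel]
      exact ih (xs.set (p + 1) 0) (by rw [List.length_set]; omega)

theorem incr_enc (k m : Nat) (hm : m < 10 ^ k) :
    incr (enc k m) = if m + 1 < 10 ^ k then enc k (m + 1) else [] := by
  induction k generalizing m with
  | zero =>
    interval_cases m
    simp [incr, enc]
  | succ k ih =>
    have hlen : (enc (k+1) m).length = k + 1 := enc_length _ _
    rw [incr, hlen]
    simp only [Nat.succ_ne_zero, Nat.add_sub_cancel]
    show incrFrom (enc k (m / 10) ++ [((m % 10 : Nat) : Int)]) k = _
    by_cases hd : m % 10 < 9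
    · -- last digit below 9: set it to +1
      rw [incrFrom]
      have hget : (enc k (m / 10) ++ [((m % 10 : Nat) : Int)]).getD k 0
          = ((m % 10 : Nat) : Int) := by
        rw [List.getD_eq_getElem?_getD]
        rw [List.getElem?_append_right (by rw [enc_length])]
        simp [enc_length]
      rw [hget]
      have hv : ((m % 10 : Nat) : Int) < 9 := by exact_mod_cast hd
      rw [if_pos hv]
      have hset : (enc k (m / 10) ++ [((m % 10 : Nat) : Int)]).set k (((m % 10 : Nat) : Int) + 1)
          = enc k (m / 10) ++ [(((m + 1) % 10 : Nat) : Int)] := by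
        rw [List.set_append_right _ _ (by rw [enc_length])]
        have : ((m + 1) % 10) = m % 10 + 1 := by omega
        simp [enc_length, this]
      rw [hset]
      have hmd : (m + 1) / 10 = m / 10 := by omega
      have hlt : m + 1 < 10 ^ (k + 1) := by
        rcases Nat.lt_or_ge (m+1) (10 ^ (k+1)) with h | h
        · exact h
        · exfalso
          have : m = 10 ^ (k+1) - 1 := by omega
          have h10 : 10 ^ (k+1) % 10 = 0 := by
            simp [pow_succ]
          have hpos : 1 ≤ 10 ^ (k+1) := Nat.one_le_pow _ _ (by norm_num)
          omega
      rw [if_pos hlt]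
      show _ = enc k ((m+1) / 10) ++ [(((m + 1) % 10 : Nat) : Int)]
      rw [hmd]
    · -- last digit 9: set to 0, carry into the prefix
      have hd9 : m % 10 = 9 := by omega
      rw [incrFrom]
      have hget : (enc k (m / 10) ++ [((m % 10 : Nat) : Int)]).getD k 0
          = ((m % 10 : Nat) : Int) := by
        rw [List.getD_eq_getElem?_getD]
        rw [List.getElem?_append_right (by rw [enc_length])]
        simp [enc_length]
      rw [hget, hd9]
      rw [if_neg (by norm_num)]
      by_cases hk0 : k = 0
      · subst hk0
        rw [if_pos rfl]
        have : m = 9 := by omega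
        subst this
        norm_num
      · rw [if_neg hk0]
        have hset : (enc k (m / 10) ++ [((9 : Nat) : Int)]).set k 0
            = enc k (m / 10) ++ [(0 : Int)] := by
          rw [List.set_append_right _ _ (by rw [enc_length])]
          simp [enc_length]
        rw [hset]
        have hq : m / 10 < 10 ^ k := by
          have : (10:Nat) ^ (k+1) = 10 ^ k * 10 := pow_succ 10 k
          omega
        have hrec : incrFrom (enc k (m / 10) ++ [(0:Int)]) (k - 1)
            = (if incrFrom (enc k (m / 10)) (k - 1) = [] then []
               else incrFrom (enc k (m / 10)) (k - 1) ++ [(0:Int)]) :=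
          incrFrom_append _ _ _ (by rw [enc_length]; omega)
        rw [hrec]
        have hincr : incrFrom (enc k (m / 10)) (k - 1) = incr (enc k (m / 10)) := by
          rw [incr, enc_length, if_neg (by omega)]
        rw [hincr, ih _ hq]
        have hp : (10:Nat) ^ (k+1) = 10 ^ k * 10 := pow_succ 10 k
        by_cases hc : m / 10 + 1 < 10 ^ k
        · have hne : enc k (m / 10 + 1) ≠ [] := by
            intro h
            have := enc_length k (m / 10 + 1)
            rw [h] at this
            simp at this
            omega
          rw [if_pos hc, if_neg hne]
          have hlt : m + 1 < 10 ^ (k + 1) := by omega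
          rw [if_pos hlt]
          have hmd : (m + 1) / 10 = m / 10 + 1 := by omega
          have hmm : (m + 1) % 10 = 0 := by omega
          show _ = enc k ((m+1) / 10) ++ [(((m + 1) % 10 : Nat) : Int)]
          rw [hmd, hmm]
          norm_num
        · rw [if_neg hc, if_pos rfl]
          have : ¬ m + 1 < 10 ^ (k + 1) := by omega
          rw [if_neg this]

theorem loop_enc (fuel k m : Nat) (acc : List (List Int)) (hm : m < 10 ^ k)
    (hfuel : 10 ^ k - m ≤ fuel) :
    listValueLoop fuel (enc k m) acc
      = acc ++ (List.range' (m + 1) (10 ^ k - (m + 1))).map (enc k) := by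
  induction fuel generalizing m acc with
  | zero => exact absurd hm (by omega)
  | succ fuel ih =>
    rw [listValueLoop]
    simp only [incr_enc k m hm]
    by_cases hc : m + 1 < 10 ^ k
    · rw [if_pos hc]
      have hne : (enc k (m+1)).length ≠ 0 := by
        rw [enc_length]
        intro h
        subst h
        rw [pow_zero] at hc
        omega
      rw [if_neg hne]
      rw [ih (m + 1) (acc ++ [enc k (m+1)]) hc (by omega)]
      have : 10 ^ k - (m + 1) = (10 ^ k - (m + 2)) + 1 := by omega
      rw [this, List.range'_succ]
      simp
    · rw [if_neg hc]
      simp only [List.length_nil, reduceIte]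
      have : 10 ^ k - (m + 1) = 0 := by omega
      rw [this]
      simp

theorem range_mul (a b : Nat) :
    List.range (a * b) = (List.range a).flatMap (fun i => (List.range b).map (fun j => b * i + j)) := by
  induction a with
  | zero => simp
  | succ a ih =>
    rw [Nat.succ_mul, List.range_add, ih, List.range_succ, List.flatMap_append]
    simp [Nat.mul_comm]

theorem enc_split (k d r : Nat) (hd : d < 10) (hr : r < 10 ^ k) :
    enc (k + 1) (d * 10 ^ k + r) = (d : Int) :: enc k r := by
  induction k generalizing d r with
  | zero =>
    interval_cases r
    simp [enc, Nat.mod_eq_of_lt hd]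
  | succ k ih =>
    rw [enc]
    have h1 : (d * 10 ^ (k + 1) + r) / 10 = d * 10 ^ k + r / 10 := by
      have : d * 10 ^ (k + 1) + r = 10 * (d * 10 ^ k) + r := by ring
      rw [this, Nat.mul_add_div (by norm_num)]
    have h2 : (d * 10 ^ (k + 1) + r) % 10 = r % 10 := by
      have : d * 10 ^ (k + 1) + r = 10 * (d * 10 ^ k) + r := by ring
      rw [this, Nat.mul_add_mod]
    rw [h1, h2]
    have hr' : r / 10 < 10 ^ k := by
      have : (10:Nat) ^ (k+1) = 10 ^ k * 10 := pow_succ 10 k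
      omega
    rw [ih d (r / 10) hd hr']
    rw [enc]
    simp

theorem alt_eq_enc (k : Nat) (n : Int) (hn : n.toNat = k) :
    listValue_alt n = (List.range (10 ^ k)).map (enc k) := by
  induction k generalizing n with
  | zero =>
    rw [listValue_alt, if_pos (by omega)]
    simp [enc]
  | succ k ih =>
    rw [listValue_alt, if_neg (by omega)]
    rw [ih (n - 1) (by omega)]
    have h10 : PySem.List.pyRange 0 10 = List.map (fun k : Nat => (k : Int)) (List.range 10) := by
      decide
    rw [h10, List.flatMap_map]
    rw [pow_succ, Nat.mul_comm, range_mul, List.map_flatMap]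
    apply List.flatMap_congr
    intro d hd
    rw [List.map_map, List.map_map]
    apply List.map_congr_left
    intro r hr
    simp only [Function.comp]
    rw [Nat.mul_comm (10 ^ k) d]
    exact (enc_split k d r (List.mem_range.mp hd) (List.mem_range.mp hr)).symm

theorem listValue_eq_enc (n : Int) :
    listValue n = (List.range (10 ^ n.toNat)).map (enc n.toNat) := by
  rw [listValue]
  have hlen : ((PySem.List.pyRange 0 n 1).map (fun _ => (0 : Int))).length = n.toNat := by
    rw [List.length_map, PySem.List.length_pyRange_one]
    omega
  have hres2 : ((PySem.List.pyRange 0 n 1).map (fun _ => (0 : Int))) = enc n.toNat 0 := by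
    rw [enc_zero, ← hlen]
    apply List.eq_replicate_of_mem
    intro b hb
    simp at hb
    exact hb.2
  simp only [hres2, enc_length]
  have hpos : 0 < 10 ^ n.toNat := by positivity
  rw [loop_enc (10 ^ n.toNat + 1) n.toNat 0 [enc n.toNat 0] hpos (by omega)]
  obtain ⟨t, ht⟩ : ∃ t, 10 ^ n.toNat = t + 1 := ⟨10 ^ n.toNat - 1, by omega⟩
  rw [List.range_eq_range', ht, List.range'_succ]
  simp

-- ===== VERDICT (by name: the statement is the Claim_ definition above) =====
theorem listValue_spec : Claim_equal_listValue := by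
  intro n _
  unfold Spec_listValue
  rw [listValue_eq_enc, alt_eq_enc n.toNat n rfl]
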